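-- pv_equiv track=rewrite | github.com/CMataczynski/Magazyn | backend.py | get_whole_route
-- ===== SOURCE A (Python) =====
-- def get_whole_route(pi, delivery_options, start=99):
--     options = ["postal_service", "DHL", "InPost", "UPS", "TNT", "DPD"]
--     end = []
--     for delivery_option in delivery_options:
--         if delivery_option in options:
--             end.append(200 + options.index(delivery_option))
--     end.sort()
--     return [start] + pi + end
-- ===== SOURCE B (Python) =====
-- def get_whole_route(pi, delivery_options, start=99):
--     options = ["postal_service", "DHL", "InPost", "UPS", "TNT", "DPD"]
--     counts = {}
--     for d in delivery_options:
--         counts[d] = counts.get(d, 0) + 1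
--     end = []
--     for i, opt in enumerate(options):
--         end += [200 + i] * counts.get(opt, 0)
--     return [start] + pi + end
-- ===== Notes on version B (the rewrite author's own statement) =====
-- stated objective: simpler
-- what changed: B counts delivery options once into a dict and emits code blocks 200+i in the canonical option order, so the per-element membership test, the inner options.index scan and the final sort all disappear.
import Mathlib
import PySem

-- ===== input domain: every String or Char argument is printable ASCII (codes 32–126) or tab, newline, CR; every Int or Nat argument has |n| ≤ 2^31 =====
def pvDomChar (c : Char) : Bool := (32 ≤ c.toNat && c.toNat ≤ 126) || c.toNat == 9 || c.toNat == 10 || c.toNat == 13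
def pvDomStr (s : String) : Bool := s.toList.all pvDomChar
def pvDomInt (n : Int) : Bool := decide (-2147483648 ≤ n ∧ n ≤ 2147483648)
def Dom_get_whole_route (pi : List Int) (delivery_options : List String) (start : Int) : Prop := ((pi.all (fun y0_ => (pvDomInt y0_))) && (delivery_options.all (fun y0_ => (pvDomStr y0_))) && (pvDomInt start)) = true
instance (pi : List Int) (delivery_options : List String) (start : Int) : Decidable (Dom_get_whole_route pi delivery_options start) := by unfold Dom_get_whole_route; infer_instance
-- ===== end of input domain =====

-- B replaces A's per-element membership test + options.index scan + final sort by a one-pass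
-- count dict and emission of the code blocks in canonical option order (objective: simpler).


-- the fixed options list both Pythons define locally
def pvOptions : List String := ["postal_service", "DHL", "InPost", "UPS", "TNT", "DPD"]

-- ===== PORT A =====
def get_whole_route (pi : List Int) (delivery_options : List String) (start : Int) : List Int :=
  let e : List Int := delivery_options.foldl
    (fun acc d =>
      if pvOptions.contains d then acc ++ [200 + (((PySem.List.index? pvOptions d).getD 0 : Nat) : Int)]
      else acc) []
  let e := PySem.List.sorted e (fun x => x) false
  [start] ++ pi ++ e

-- ===== PORT B =====
def get_whole_route_alt (pi : List Int) (delivery_options : List String) (start : Int) : List Int :=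
  let counts : PySem.Dict String Int :=
    delivery_options.foldl (fun d x => d.insert x (d.getD x 0 + 1)) PySem.Dict.empty
  let e : List Int := (PySem.List.enumerate pvOptions).foldl
    (fun acc p => acc ++ PySem.List.pyRepeat [200 + p.1] (counts.getD p.2 0)) []
  [start] ++ pi ++ e

-- ===== PRECONDITION & SPEC =====
def Spec_get_whole_route (pi : List Int) (delivery_options : List String) (start : Int) (out : List Int) : Prop := out = get_whole_route_alt pi delivery_options start
instance (pi : List Int) (delivery_options : List String) (start : Int) (out : List Int) : Decidable (Spec_get_whole_route pi delivery_options start out) := by unfold Spec_get_whole_route; infer_instance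

-- ===== CLAIM (what is proved, stated in full; the proofs are below) =====
def Claim_equal_get_whole_route : Prop := ∀ (pi : List Int) (delivery_options : List String) (start : Int), Dom_get_whole_route pi delivery_options start → Spec_get_whole_route pi delivery_options start (get_whole_route pi delivery_options start)

-- ===== LEMMAS AND PROOFS =====

-- A's (unsorted) code list for a given input
def pvCodesA (l : List String) : List Int :=
  (l.filter pvOptions.contains).map
    (fun d => 200 + (((PySem.List.index? pvOptions d).getD 0 : Nat) : Int))

-- B's code list, written as the six blocks it concretely is
def pvBlocks (l : List String) : List Int :=
  List.replicate (l.count "postal_service") 200 ++ List.replicate (l.count "DHL") 201 ++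
  List.replicate (l.count "InPost") 202 ++ List.replicate (l.count "UPS") 203 ++
  List.replicate (l.count "TNT") 204 ++ List.replicate (l.count "DPD") 205

lemma pvBlocks_perm (l : List String) : (pvBlocks l).Perm (pvCodesA l) := by
  induction l with
  | nil => simp [pvBlocks, pvCodesA]
  | cons d t ih =>
    by_cases hd : d ∈ pvOptions
    · have hR : pvCodesA (d :: t)
          = (200 + (((PySem.List.index? pvOptions d).getD 0 : Nat) : Int)) :: pvCodesA t := by
        simp [pvCodesA, hd]
      have e1 : (200 + (((List.idxOf? "postal_service" pvOptions).getD 0 : Nat)) : Int) = 200 := by decide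
      have e2 : (200 + (((List.idxOf? "DHL" pvOptions).getD 0 : Nat)) : Int) = 201 := by decide
      have e3 : (200 + (((List.idxOf? "InPost" pvOptions).getD 0 : Nat)) : Int) = 202 := by decide
      have e4 : (200 + (((List.idxOf? "UPS" pvOptions).getD 0 : Nat)) : Int) = 203 := by decide
      have e5 : (200 + (((List.idxOf? "TNT" pvOptions).getD 0 : Nat)) : Int) = 204 := by decide
      have e6 : (200 + (((List.idxOf? "DPD" pvOptions).getD 0 : Nat)) : Int) = 205 := by decide
      rw [hR]
      refine List.Perm.trans ?_ (ih.cons _)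
      rw [List.perm_iff_count]
      intro v
      fin_cases hd <;>
      · simp [e2, e3, e4, e5, e6, pvBlocks, List.count_append, List.count_replicate,
          List.count_cons]
        split_ifs <;> omega
    · have h6 : d ≠ "postal_service" ∧ d ≠ "DHL" ∧ d ≠ "InPost" ∧ d ≠ "UPS" ∧ d ≠ "TNT" ∧ d ≠ "DPD" := by
        simpa [pvOptions] using hd
      obtain ⟨h1,h2,h3,h4,h5,h6'⟩ := h6
      simpa [pvBlocks, pvCodesA, List.count_cons, List.filter_cons, h1,h2,h3,h4,h5,h6', hd] using ih

lemma pvBlocks_pairwise (l : List String) : (pvBlocks l).Pairwise (· ≤ ·) := by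
  unfold pvBlocks
  simp [List.pairwise_append, List.mem_replicate, List.pairwise_replicate]
  aesop

lemma pvFoldA (l : List String) : l.foldl
    (fun acc d =>
      if pvOptions.contains d then acc ++ [200 + (((PySem.List.index? pvOptions d).getD 0 : Nat) : Int)]
      else acc) [] = pvCodesA l := by
  rw [PySem.List.foldl_append_if]
  simp [pvCodesA]

lemma pvFoldB (l : List String) : (PySem.List.enumerate pvOptions).foldl
    (fun acc p => acc ++ PySem.List.pyRepeat [200 + p.1]
      ((l.foldl (fun d x => d.insert x (d.getD x 0 + 1)) PySem.Dict.empty).getD p.2 0)) []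
    = pvBlocks l := by
  simp only [PySem.Dict.getD_foldl_insert_add_one, PySem.Dict.getD_empty]
  simp [pvOptions, PySem.List.enumerate, PySem.List.pyRepeat_singleton, pvBlocks]

-- ===== VERDICT (by name: the statement is the Claim_ definition above) =====
theorem get_whole_route_spec : Claim_equal_get_whole_route := by
  intro pi delivery_options start _
  unfold Spec_get_whole_route get_whole_route get_whole_route_alt
  simp only [pvFoldA, pvFoldB]
  rw [PySem.List.sorted_id_eq_of_perm_of_pairwise (pvCodesA delivery_options)
      (pvBlocks delivery_options) (pvBlocks_perm delivery_options)
      (pvBlocks_pairwise delivery_options)]
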